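-- pv_equiv track=rewrite | github.com/GregDMeyer/dynamite | examples/scripts/floquet/run_floquet.py | domain_wall_state_str
-- ===== SOURCE A (Python) =====
-- def domain_wall_state_str(dwalls, L):
--     '''
--     Create a string like 'UUUUDDDDUUUU' that specifies a state with 'dwalls'
--     domain walls.
--     '''
--     if dwalls >= L:
--         raise ValueError('cannot have more domain walls than the number of spins - 1')
--
--     c = 'U'
--     rtn = ''
--     for domain_idx in range(dwalls+1):
--         rtn += c*((L-len(rtn)) // (dwalls-domain_idx+1))
--         c = 'D' if c == 'U' else 'U'  # switch between 'D' and 'U'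
--     return rtn
-- ===== SOURCE B (Python) =====
-- def domain_wall_state_str(dwalls, L):
--     '''
--     Create a string like 'UUUUDDDDUUUU' that specifies a state with 'dwalls'
--     domain walls.
--     '''
--     if dwalls >= L:
--         raise ValueError('cannot have more domain walls than the number of spins - 1')
--     n = dwalls + 1
--     if n <= 0:
--         return ''
--     base, rem = divmod(L, n)
--     return ''.join(('U' if i % 2 == 0 else 'D') * (base + (1 if i >= n - rem else 0))
--                    for i in range(n))
-- ===== Notes on version B (the rewrite author's own statement) =====
-- stated objective: simpler
-- what changed: Replaces A's greedy loop whose segment size depends on the accumulated string length ((L-len(rtn))//(segments left)) with a one-shot divmod(L, dwalls+1) closed-form split: each segment i gets base + (1 if i >= n-rem else 0) characters, chosen by i's parity, joined at the end.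
import Mathlib
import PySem

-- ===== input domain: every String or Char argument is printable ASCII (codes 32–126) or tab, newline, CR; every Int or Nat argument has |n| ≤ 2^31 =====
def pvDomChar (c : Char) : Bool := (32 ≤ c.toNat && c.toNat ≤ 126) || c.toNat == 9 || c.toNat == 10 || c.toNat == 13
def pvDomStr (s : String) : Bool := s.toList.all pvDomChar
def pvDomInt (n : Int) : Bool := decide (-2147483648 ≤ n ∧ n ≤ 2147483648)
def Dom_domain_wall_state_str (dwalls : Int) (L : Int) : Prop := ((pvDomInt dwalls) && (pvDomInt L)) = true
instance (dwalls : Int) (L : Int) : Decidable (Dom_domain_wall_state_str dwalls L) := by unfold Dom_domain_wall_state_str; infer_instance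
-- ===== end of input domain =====

-- B replaces A's accumulator-dependent greedy segment size (L-len(rtn))//(segments left)
-- by a closed-form base/remainder split computed once up front (objective: simpler).
-- Both Pythons raise ValueError when dwalls >= L; Pre_ excludes exactly those inputs.

-- ===== PORT A =====
-- A's loop body: toggle the character and append c * ((L - len(rtn)) // (dwalls - domain_idx + 1)).
def aStep (dwalls L : Int) (st : Char × List Char) (domain_idx : Int) : Char × List Char :=
  ((if st.1 = 'U' then 'D' else 'U'),
   st.2 ++ PySem.List.pyRepeat [st.1]
     (PySem.Int.floordiv (L - (st.2.length : Int)) (dwalls - domain_idx + 1)))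

def domain_wall_state_str (dwalls : Int) (L : Int) : String :=
  if dwalls ≥ L then ""   -- Python raises ValueError here; excluded by Pre_
  else
    String.ofList (((PySem.List.pyRange 0 (dwalls + 1) 1).foldl (aStep dwalls L) ('U', [])).2)

-- ===== PORT B =====
-- B's generator element: ('U' if i % 2 == 0 else 'D') * (base + (1 if i >= n - rem else 0))
def bSeg (base rem n : Int) (i : Int) : List Char :=
  List.replicate (base + if n - rem ≤ i then 1 else 0).toNat
    (if PySem.Int.mod i 2 = 0 then 'U' else 'D')

def domain_wall_state_str_alt (dwalls : Int) (L : Int) : String :=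
  if dwalls ≥ L then ""   -- Python raises ValueError here; excluded by Pre_
  else
    let n := dwalls + 1
    if n ≤ 0 then ""
    else
      let base := PySem.Int.floordiv L n
      let rem := PySem.Int.mod L n
      String.ofList (((PySem.List.pyRange 0 n 1).map (bSeg base rem n)).flatten)

-- ===== PRECONDITION & SPEC =====
-- Pre_ excludes exactly the inputs where both Pythons raise ValueError (dwalls >= L).
def Pre_domain_wall_state_str (dwalls : Int) (L : Int) : Prop := dwalls < L
instance (dwalls : Int) (L : Int) : Decidable (Pre_domain_wall_state_str dwalls L) := by
  unfold Pre_domain_wall_state_str; infer_instance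

def pvWitness_domain_wall_state_str : Int × Int := (2, 8)

def Spec_domain_wall_state_str (dwalls : Int) (L : Int) (out : String) : Prop := out = domain_wall_state_str_alt dwalls L
instance (dwalls : Int) (L : Int) (out : String) : Decidable (Spec_domain_wall_state_str dwalls L out) := by unfold Spec_domain_wall_state_str; infer_instance

-- ===== CLAIM (what is proved, stated in full; the proofs are below) =====
def Claim_equal_domain_wall_state_str : Prop := ∀ (dwalls : Int) (L : Int), Dom_domain_wall_state_str dwalls L → Pre_domain_wall_state_str dwalls L → Spec_domain_wall_state_str dwalls L (domain_wall_state_str dwalls L)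

-- ===== LEMMAS AND PROOFS =====

-- length of the closed-form prefix of i segments
lemma lenPrefix (base rem n : Int) (hb : 0 ≤ base) (hrn : rem ≤ n) :
    ∀ i : Nat, ((((PySem.List.pyRange 0 (i : Int) 1).map (bSeg base rem n)).flatten).length : Int)
      = (i : Int) * base + max 0 ((i : Int) - (n - rem)) := by
  intro i
  induction i with
  | zero =>
    simp [PySem.List.pyRange_one_eq_nil]
    omega
  | succ i ih =>
    have hsplit : PySem.List.pyRange 0 ((i + 1 : Nat) : Int) 1
        = PySem.List.pyRange 0 (i : Int) 1 ++ [(i : Int)] := by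
      have := PySem.List.pyRange_one_succ_right (a := 0) (b := (i : Int)) (by positivity)
      push_cast
      push_cast at this
      exact this
    rw [hsplit]
    simp only [List.map_append, List.flatten_append, List.length_append]
    push_cast [ih]
    have hchunk : (((List.map (bSeg base rem n) [(i : Int)]).flatten.length : Nat) : Int)
        = base + (if n - rem ≤ (i : Int) then 1 else 0) := by
      simp [bSeg]
      split_ifs <;> omega
    rw [hchunk]
    have hring : ((i : Int) + 1) * base = (i : Int) * base + base := by ring
    rw [hring]
    split_ifs <;> (generalize (i : Int) * base = t; omega)

-- the greedy floor-division size equals the closed-form size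
lemma greedy_size (base rem n i : Int) (hr : 0 ≤ rem)
    (hin : i < n) (hL : base * n + rem = L) :
    PySem.Int.floordiv (L - (i * base + max 0 (i - (n - rem)))) (n - i)
      = base + (if n - rem ≤ i then 1 else 0) := by
  have hpos : 0 < n - i := by omega
  rw [PySem.Int.floordiv_eq_iff_of_pos hpos]
  split_ifs with h
  · have hmax : max 0 (i - (n - rem)) = i - (n - rem) := by omega
    rw [hmax]
    constructor
    · nlinarith
    · nlinarith
  · have hmax : max 0 (i - (n - rem)) = 0 := by omega
    rw [hmax]
    constructor
    · nlinarith
    · nlinarith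

-- the alternating character as a function of the index
lemma charAt_step (i : Nat) :
    (if (if PySem.Int.mod (i : Int) 2 = 0 then 'U' else 'D') = 'U' then 'D' else 'U')
      = (if PySem.Int.mod ((i : Int) + 1) 2 = 0 then 'U' else 'D') := by
  rw [PySem.Int.mod_eq_emod_of_pos (a := (i : Int)) (by norm_num),
      PySem.Int.mod_eq_emod_of_pos (a := (i : Int) + 1) (by norm_num)]
  rcases Int.emod_two_eq_zero_or_one (i : Int) with h | h
  · have h1 : ((i : Int) + 1) % 2 = 1 := by omega
    simp [h, h1]
  · have h1 : ((i : Int) + 1) % 2 = 0 := by omega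
    simp [h, h1]

-- loop invariant: A's fold over the first i indices produces the closed-form prefix
lemma loopA_inv (dwalls L : Int) (hn : 0 < dwalls + 1) (hL : dwalls < L) :
    ∀ i : Nat, (i : Int) ≤ dwalls + 1 →
      (PySem.List.pyRange 0 (i : Int) 1).foldl (aStep dwalls L) ('U', []) =
        ((if PySem.Int.mod (i : Int) 2 = 0 then 'U' else 'D'),
         ((PySem.List.pyRange 0 (i : Int) 1).map
           (bSeg (PySem.Int.floordiv L (dwalls + 1)) (PySem.Int.mod L (dwalls + 1)) (dwalls + 1))).flatten) := by
  set n := dwalls + 1 with hn_def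
  set base := PySem.Int.floordiv L n with hbase
  set rem := PySem.Int.mod L n with hrem
  have hb : 0 ≤ base := by
    rw [hbase, PySem.Int.le_floordiv_iff_mul_le hn]
    omega
  have hr : 0 ≤ rem := hrem ▸ PySem.Int.mod_nonneg _ hn
  have hrn : rem < n := hrem ▸ PySem.Int.mod_lt _ hn
  have hdm : base * n + rem = L := by
    rw [hbase, hrem]; exact PySem.Int.floordiv_mul_add_mod L n
  intro i
  induction i with
  | zero => simp [PySem.List.pyRange_one_eq_nil, PySem.Int.mod]
  | succ i ih =>
    intro hile
    have hile' : (i : Int) ≤ n := by push_cast at hile ⊢; omega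
    have hilt : (i : Int) < n := by push_cast at hile; omega
    have hsplit : PySem.List.pyRange 0 ((i + 1 : Nat) : Int) 1
        = PySem.List.pyRange 0 (i : Int) 1 ++ [(i : Int)] := by
      have := PySem.List.pyRange_one_succ_right (a := 0) (b := (i : Int)) (by positivity)
      push_cast
      push_cast at this
      exact this
    rw [hsplit, List.foldl_append, ih hile', List.map_append, List.flatten_append]
    simp only [List.foldl_cons, List.foldl_nil]
    unfold aStep
    refine Prod.ext ?_ ?_
    · simpa using charAt_step i
    · simp only
      rw [lenPrefix base rem n hb (le_of_lt hrn) i]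
    -- the appended chunk is exactly bSeg at index i
      have hdiv : dwalls - (i : Int) + 1 = n - (i : Int) := by omega
      rw [hdiv, greedy_size base rem n (i : Int) hr hilt hdm]
      simp [bSeg, PySem.List.pyRepeat_singleton]

-- ===== VERDICT (by name: the statement is the Claim_ definition above) =====
theorem domain_wall_state_str_spec : Claim_equal_domain_wall_state_str := by
  unfold Claim_equal_domain_wall_state_str
  intro dwalls L _ hpre
  unfold Spec_domain_wall_state_str Pre_domain_wall_state_str at *
  unfold domain_wall_state_str domain_wall_state_str_alt
  rw [if_neg (by omega), if_neg (by omega)]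
  by_cases hn : dwalls + 1 ≤ 0
  · rw [if_pos hn]
    rw [PySem.List.pyRange_one_eq_nil (by omega)]
    rfl
  · rw [if_neg hn]
    have hn' : 0 < dwalls + 1 := by omega
    have hcast : (((dwalls + 1).toNat : Int)) = dwalls + 1 := by omega
    have := loopA_inv dwalls L hn' hpre (dwalls + 1).toNat (by omega)
    rw [hcast] at this
    rw [this]
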